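-- pv_equiv track=rewrite | github.com/Vilin97/DataMiningProject1 | kmeans.py | disagreement_distance
-- ===== SOURCE A (Python) =====
-- def disagreement_distance(series1,series2):
--     # series1[i] = cluster of ith movie in the first clustering
--     # return disagreement distance between two clusterings
--     n = min(len(series1),len(series2))
--     disagreement = 0
--     for i in range(n):
--         for j in range(i+1):
--             if (series1[i] == series1[j] and series2[i] != series2[j]) or (series1[i] != series1[j] and series2[i] == series2[j]):
--                 disagreement += 1
--     return disagreement
-- ===== SOURCE B (Python) =====
-- def disagreement_distance(series1, series2):
--     # O(n): count cluster sizes in each clustering and joint-label sizes,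
--     # then combine pair counts: pairs agreeing in one clustering only
--     # = pairs(same in 1) + pairs(same in 2) - 2 * pairs(same in both).
--     c1 = {}
--     c2 = {}
--     c12 = {}
--     for a, b in zip(series1, series2):
--         c1[a] = c1.get(a, 0) + 1
--         c2[b] = c2.get(b, 0) + 1
--         c12[(a, b)] = c12.get((a, b), 0) + 1
--     def pairs(c):
--         return sum(v * (v - 1) // 2 for v in c.values())
--     return pairs(c1) + pairs(c2) - 2 * pairs(c12)
-- ===== Notes on version B (the rewrite author's own statement) =====
-- stated objective: faster
-- what changed: Replaces the O(n^2) scan over all index pairs by one O(n) counting pass (cluster sizes and joint-label sizes in dicts) combined with the C(k,2) pair-count formula: disagreements = samePairs(1) + samePairs(2) - 2*samePairs(both).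
import Mathlib
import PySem

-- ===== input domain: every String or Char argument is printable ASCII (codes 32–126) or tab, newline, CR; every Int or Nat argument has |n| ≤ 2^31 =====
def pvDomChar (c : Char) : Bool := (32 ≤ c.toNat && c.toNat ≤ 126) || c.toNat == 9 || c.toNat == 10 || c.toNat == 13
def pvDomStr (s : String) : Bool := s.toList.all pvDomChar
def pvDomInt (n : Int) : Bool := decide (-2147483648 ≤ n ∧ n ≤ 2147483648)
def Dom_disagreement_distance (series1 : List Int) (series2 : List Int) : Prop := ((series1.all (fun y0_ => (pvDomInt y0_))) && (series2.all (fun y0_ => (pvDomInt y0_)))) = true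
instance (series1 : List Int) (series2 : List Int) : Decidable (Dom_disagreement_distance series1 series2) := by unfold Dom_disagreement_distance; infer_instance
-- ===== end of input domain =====

-- B replaces A's O(n^2) scan over all index pairs by one counting pass plus
-- the C(k,2) pair-count formula (objective: faster, asymptotically).

-- ===== PORT A =====
-- literal port of A: double loop over i in range(n), j in range(i+1), counting disagreeing pairs
def disagreement_distance (series1 : List Int) (series2 : List Int) : Int :=
  let n : Int := min (series1.length : Int) (series2.length : Int)
  (PySem.List.pyRange 0 n 1).foldl (fun disagreement i =>
    (PySem.List.pyRange 0 (i + 1) 1).foldl (fun disagreement j =>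
      if (PySem.List.pyGetD series1 i 0 = PySem.List.pyGetD series1 j 0 ∧
            ¬ PySem.List.pyGetD series2 i 0 = PySem.List.pyGetD series2 j 0) ∨
         (¬ PySem.List.pyGetD series1 i 0 = PySem.List.pyGetD series1 j 0 ∧
            PySem.List.pyGetD series2 i 0 = PySem.List.pyGetD series2 j 0)
      then disagreement + 1 else disagreement) disagreement) 0

-- ===== PORT B =====
-- pairs(c) = sum(v * (v - 1) // 2 for v in c.values())
def pvPairsOfDict {κ : Type} [BEq κ] (c : PySem.Dict κ Int) : Int :=
  (c.values.map (fun v => PySem.Int.floordiv (v * (v - 1)) 2)).sum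

-- literal port of B: one loop over zip(series1, series2) building three count dicts
def disagreement_distance_alt (series1 : List Int) (series2 : List Int) : Int :=
  let cs := (series1.zip series2).foldl
    (fun s x =>
      (s.1.insert x.1 (s.1.getD x.1 0 + 1),
       (s.2.1.insert x.2 (s.2.1.getD x.2 0 + 1),
        s.2.2.insert x (s.2.2.getD x 0 + 1))))
    (PySem.Dict.empty, (PySem.Dict.empty, PySem.Dict.empty))
  pvPairsOfDict cs.1 + pvPairsOfDict cs.2.1 - 2 * pvPairsOfDict cs.2.2

-- ===== PRECONDITION & SPEC =====
def Spec_disagreement_distance (series1 : List Int) (series2 : List Int) (out : Int) : Prop := out = disagreement_distance_alt series1 series2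
instance (series1 : List Int) (series2 : List Int) (out : Int) : Decidable (Spec_disagreement_distance series1 series2 out) := by unfold Spec_disagreement_distance; infer_instance

-- ===== CLAIM (what is proved, stated in full; the proofs are below) =====
def Claim_equal_disagreement_distance : Prop := ∀ (series1 : List Int) (series2 : List Int), Dom_disagreement_distance series1 series2 → Spec_disagreement_distance series1 series2 (disagreement_distance series1 series2)


-- ===== LEMMAS AND PROOFS =====

-- the disagreement predicate on (cluster-in-1, cluster-in-2) pairs
def pvDis (x y : Int × Int) : Bool :=
  ((x.1 == y.1) && !(x.2 == y.2)) || (!(x.1 == y.1) && (x.2 == y.2))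

-- number of unordered index pairs i < j satisfying P, as an Int
def pvPairCount {a : Type} (P : a -> a -> Bool) : List a -> Int
  | [] => 0
  | x :: xs => (xs.countP (fun y => P y x) : Int) + pvPairCount P xs

def pvF (v : Int) : Int := PySem.Int.floordiv (v * (v - 1)) 2

theorem pvF_succ (c : Int) : pvF (c + 1) = pvF c + c := by
  have h : (c + 1) * c = c * (c - 1) + 2 * c := by ring
  simp only [pvF, PySem.Int.floordiv]
  rw [show (c+1)*((c+1)-1) = c*(c-1) + 2*c by ring,
      show (2:Int)*c = c*2 by ring, Int.add_mul_fdiv_right _ _ (by norm_num)]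

theorem pvPairCount_append_singleton {a : Type} (P : a -> a -> Bool)
    (hP : forall u v, P u v = P v u) (l : List a) (x : a) :
    pvPairCount P (l ++ [x]) = pvPairCount P l + (l.countP (fun y => P y x) : Int) := by
  induction l with
  | nil => simp [pvPairCount]
  | cons y t ih =>
    simp only [List.cons_append, pvPairCount, ih, List.countP_append, List.countP_cons,
      List.countP_nil, hP x y]
    push_cast
    ring

theorem pvDis_self (x : Int × Int) : pvDis x x = false := by simp [pvDis]

-- A's double loop, rewritten over the zipped list
def pvG (ps : List (Int × Int)) : Int :=
  (PySem.List.pyRange 0 (ps.length : Int) 1).foldl (fun acc i =>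
    (PySem.List.pyRange 0 (i + 1) 1).foldl (fun acc j =>
      if pvDis (PySem.List.pyGetD ps i (0, 0)) (PySem.List.pyGetD ps j (0, 0))
      then acc + 1 else acc) acc) 0

theorem pvA_eq_G (s1 s2 : List Int) :
    disagreement_distance s1 s2 = pvG (s1.zip s2) := by
  unfold disagreement_distance pvG
  have hn : min ((s1.length : Int)) ((s2.length : Int)) = ((s1.zip s2).length : Int) := by
    simp [List.length_zip]
  rw [hn]
  apply PySem.List.foldl_congr_mem
  intro acc i hi
  rw [PySem.List.mem_pyRange_one] at hi
  apply PySem.List.foldl_congr_mem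
  intro acc2 j hj
  rw [PySem.List.mem_pyRange_one] at hj
  have hi1 : i < ((s1.length : Int)) := by
    have := hi.2; simp [List.length_zip] at this; omega
  have hi2 : i < ((s2.length : Int)) := by
    have := hi.2; simp [List.length_zip] at this; omega
  have hj1 : j < ((s1.length : Int)) := by omega
  have hj2 : j < ((s2.length : Int)) := by omega
  have hjz : j < (((s1.zip s2).length : Int)) := by omega
  rw [PySem.List.pyGetD_eq_getElem s1 0 hi.1 hi1, PySem.List.pyGetD_eq_getElem s2 0 hi.1 hi2,
      PySem.List.pyGetD_eq_getElem s1 0 hj.1 hj1, PySem.List.pyGetD_eq_getElem s2 0 hj.1 hj2,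
      PySem.List.pyGetD_eq_getElem _ (0,0) hi.1 hi.2, PySem.List.pyGetD_eq_getElem _ (0,0) hj.1 hjz]
  simp only [List.getElem_zip, pvDis, Bool.or_eq_true, Bool.and_eq_true, beq_iff_eq,
    Bool.not_eq_true', beq_eq_false_iff_ne, ne_eq]

theorem pvDis_symm (u v : Int × Int) : pvDis u v = pvDis v u := by
  simp only [pvDis]
  rcases h1 : u.1 == v.1 <;> rcases h2 : u.2 == v.2 <;>
    simp_all [BEq.comm]




theorem pvG_append_singleton (ps : List (Int × Int)) (x : Int × Int) :
    pvG (ps ++ [x]) = pvG ps + (ps.countP (fun y => pvDis y x) : Int) := by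
  unfold pvG
  have hlen : (((ps ++ [x]).length : Int)) = (ps.length : Int) + 1 := by
    simp
  rw [hlen, PySem.List.pyRange_one_succ_right (by positivity)]
  rw [List.foldl_append]
  have hfirst : forall (init : Int),
      (PySem.List.pyRange 0 (ps.length : Int) 1).foldl (fun acc i =>
        (PySem.List.pyRange 0 (i + 1) 1).foldl (fun acc j =>
          if pvDis (PySem.List.pyGetD (ps ++ [x]) i (0, 0)) (PySem.List.pyGetD (ps ++ [x]) j (0, 0))
          then acc + 1 else acc) acc) init
      = (PySem.List.pyRange 0 (ps.length : Int) 1).foldl (fun acc i =>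
        (PySem.List.pyRange 0 (i + 1) 1).foldl (fun acc j =>
          if pvDis (PySem.List.pyGetD ps i (0, 0)) (PySem.List.pyGetD ps j (0, 0))
          then acc + 1 else acc) acc) init := by
    intro init
    apply PySem.List.foldl_congr_mem
    intro acc i hi
    rw [PySem.List.mem_pyRange_one] at hi
    apply PySem.List.foldl_congr_mem
    intro acc2 j hj
    rw [PySem.List.mem_pyRange_one] at hj
    have hget : forall (k : Int), 0 <= k -> k < (ps.length : Int) ->
        PySem.List.pyGetD (ps ++ [x]) k (0,0) = PySem.List.pyGetD ps k (0,0) := by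
      intro k h0 h1
      rw [PySem.List.pyGetD_eq_getElem _ _ h0 (by simp; omega),
          PySem.List.pyGetD_eq_getElem _ _ h0 h1]
      rw [List.getElem_append_left]
    rw [hget i hi.1 hi.2, hget j hj.1 (by omega)]
  rw [hfirst]
  simp only [List.foldl_cons, List.foldl_nil]
  rw [PySem.List.foldl_if_add_one]
  congr 1
  have hx : PySem.List.pyGetD (ps ++ [x]) (ps.length : Int) (0,0) = x := by
    rw [PySem.List.pyGetD_eq_getElem _ _ (by positivity) (by simp)]
    simp
  rw [PySem.List.pyRange_one_succ_right (by positivity), List.countP_append]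
  have hlast : List.countP
      (fun j => pvDis (PySem.List.pyGetD (ps ++ [x]) (ps.length : Int) (0,0))
        (PySem.List.pyGetD (ps ++ [x]) j (0,0))) [(ps.length : Int)] = 0 := by
    simp [hx, pvDis_self]
  rw [hlast]
  have hcongr : List.countP
      (fun j => pvDis (PySem.List.pyGetD (ps ++ [x]) (ps.length : Int) (0,0))
        (PySem.List.pyGetD (ps ++ [x]) j (0,0))) (PySem.List.pyRange 0 (ps.length : Int) 1)
      = List.countP (fun j => pvDis x (PySem.List.pyGetD ps j (0,0)))
          (PySem.List.pyRange 0 (ps.length : Int) 1) := by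
    apply List.countP_congr
    intro j hj
    rw [PySem.List.mem_pyRange_one] at hj
    rw [hx, PySem.List.pyGetD_eq_getElem _ _ hj.1 (by simp; omega),
        PySem.List.pyGetD_eq_getElem _ _ hj.1 hj.2, List.getElem_append_left]
  rw [hcongr, Nat.add_zero]
  congr 1
  have hmap := PySem.List.map_pyGetD_pyRange_zero' ps (0,0)
  calc List.countP (fun j => pvDis x (PySem.List.pyGetD ps j (0,0)))
        (PySem.List.pyRange 0 (ps.length : Int) 1)
      = List.countP (fun y => pvDis x y)
          ((PySem.List.pyRange 0 (ps.length : Int) 1).map (fun j => PySem.List.pyGetD ps j (0,0))) := by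
        rw [List.countP_map]; rfl
    _ = List.countP (fun y => pvDis y x) ps := by
        rw [hmap]; exact List.countP_congr (fun y _ => by rw [pvDis_symm])

theorem pvG_eq_pairCount (ps : List (Int × Int)) : pvG ps = pvPairCount pvDis ps := by
  induction ps using List.reverseRecOn with
  | nil => rfl
  | append_singleton t x ih =>
    rw [pvG_append_singleton, pvPairCount_append_singleton pvDis pvDis_symm, ih]


-- sum over a Nodup key list when the summand changes at exactly one key
theorem pvSum_update {a : Type} (keys : List a) (x : a) (hnd : keys.Nodup) (hx : x ∈ keys)
    (g g' : a -> Int) (h : forall k, k ∈ keys -> k ≠ x -> g' k = g k) :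
    (keys.map g').sum = (keys.map g).sum + (g' x - g x) := by
  induction keys with
  | nil => cases hx
  | cons y t ih =>
    rcases List.nodup_cons.mp hnd with ⟨hyt, hndt⟩
    rcases List.mem_cons.mp hx with rfl | hxt
    · have : t.map g' = t.map g :=
        List.map_congr_left (fun k hk => h k (List.mem_cons_of_mem _ hk) (fun he => hyt (he ▸ hk)))
      simp only [List.map_cons, List.sum_cons, this]
      ring
    · have hyx : y ≠ x := fun he => hyt (he ▸ hxt)
      rw [List.map_cons, List.map_cons, List.sum_cons, List.sum_cons,
        ih hndt hxt (fun k hk hkx => h k (List.mem_cons_of_mem _ hk) hkx),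
        h y (List.mem_cons_self) hyx]
      ring

theorem pvOfList_append_singleton {a : Type} [BEq a] (l : List a) (x : a) :
    PySem.Set.ofList (l ++ [x]) = PySem.Set.add (PySem.Set.ofList l) x := by
  rw [PySem.Set.ofList_eq_foldl, PySem.Set.ofList_eq_foldl, List.foldl_append]
  rfl

theorem pvPairs_counter_eq {a : Type} [BEq a] [LawfulBEq a] (l : List a) :
    pvPairsOfDict (PySem.Dict.counter l)
      = ((PySem.Set.ofList l).map (fun k => pvF ((l.count k : Int)))).sum := by
  unfold pvPairsOfDict
  rw [show (PySem.Dict.counter l).values = (PySem.Dict.counter l).items.map (·.2) from rfl,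
      PySem.Dict.items_counter, List.map_map, List.map_map]
  rfl

theorem pvS_append {a : Type} [BEq a] [LawfulBEq a] (l : List a) (x : a) :
    ((PySem.Set.ofList (l ++ [x])).map (fun k => pvF (((l ++ [x]).count k : Int)))).sum
      = ((PySem.Set.ofList l).map (fun k => pvF ((l.count k : Int)))).sum + (l.count x : Int) := by
  rw [pvOfList_append_singleton]
  have hc : forall k : a, k ≠ x -> (l ++ [x]).count k = l.count k := by
    intro k hkx
    simp [List.count_append, Ne.symm hkx]
  by_cases hx : x ∈ l
  · have hadd : PySem.Set.add (PySem.Set.ofList l) x = PySem.Set.ofList l := by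
      simp [PySem.Set.add, (PySem.Set.mem_ofList l x).mpr hx]
    rw [hadd]
    rw [pvSum_update (PySem.Set.ofList l) x (PySem.Set.nodup_ofList l)
      ((PySem.Set.mem_ofList l x).mpr hx)
      (fun k => pvF ((l.count k : Int))) (fun k => pvF (((l ++ [x]).count k : Int)))
      (fun k _ hkx => by show pvF _ = pvF _; rw [hc k hkx])]
    have hcx : (((l ++ [x]).count x : Int)) = (l.count x : Int) + 1 := by
      simp [List.count_append]
    rw [hcx, pvF_succ]
    ring
  · have hmem : ¬ x ∈ PySem.Set.ofList l := by
      simpa [PySem.Set.mem_ofList] using hx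
    have hadd : PySem.Set.add (PySem.Set.ofList l) x = PySem.Set.ofList l ++ [x] := by
      simp [PySem.Set.add, hmem]
    rw [hadd, List.map_append, List.sum_append]
    have h1 : (PySem.Set.ofList l).map (fun k => pvF (((l ++ [x]).count k : Int)))
        = (PySem.Set.ofList l).map (fun k => pvF ((l.count k : Int))) := by
      apply List.map_congr_left
      intro k hk
      have hkx : k ≠ x := fun he => hx (he ▸ (PySem.Set.mem_ofList l k).mp hk)
      rw [hc k hkx]
    have h2 : ((l ++ [x]).count x : Int) = 1 := by
      simp [List.count_append, List.count_eq_zero_of_not_mem hx]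
    have h3 : (l.count x : Int) = 0 := by
      rw [List.count_eq_zero_of_not_mem hx]; rfl
    have h4 : pvF (((l ++ [x]).count x : Int)) = 0 := by
      rw [h2]; simp [pvF, PySem.Int.floordiv]
    rw [h1, h3]
    simp only [List.map_singleton, List.sum_singleton, h4, add_zero]

theorem pvPairs_counter {a : Type} [BEq a] [LawfulBEq a] (l : List a) :
    pvPairsOfDict (PySem.Dict.counter l) = pvPairCount (fun u v => u == v) l := by
  induction l using List.reverseRecOn with
  | nil => rfl
  | append_singleton t x ih =>
    rw [pvPairs_counter_eq, pvS_append, ← pvPairs_counter_eq, ih,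
      pvPairCount_append_singleton _ (fun u v => by rw [BEq.comm])]
    rw [List.count]


theorem pvCountP_decomp (x : Int × Int) (xs : List (Int × Int)) :
    (xs.countP (fun y => pvDis y x) : Int)
      = (xs.countP (fun y => y.1 == x.1) : Int) + (xs.countP (fun y => y.2 == x.2) : Int)
        - 2 * (xs.countP (fun y => y == x) : Int) := by
  induction xs with
  | nil => simp
  | cons y t ih =>
    have hbeq : (y == x) = (y.1 == x.1 && y.2 == x.2) := by
      rcases y with ⟨y1, y2⟩; rcases x with ⟨x1, x2⟩; rfl
    simp only [pvDis] at ih ⊢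
    rcases h1 : (y.1 == x.1) <;> rcases h2 : (y.2 == x.2) <;>
      simp [h1, h2, hbeq] <;> omega

theorem pvDecomp (ps : List (Int × Int)) :
    pvPairCount pvDis ps
      = pvPairCount (fun u v => u.1 == v.1) ps + pvPairCount (fun u v => u.2 == v.2) ps
        - 2 * pvPairCount (fun u v => u == v) ps := by
  induction ps with
  | nil => rfl
  | cons x t ih =>
    simp only [pvPairCount, ih, pvCountP_decomp x t]
    ring

theorem pvPairCount_map {a b : Type} [BEq b] (f : a -> b) (ps : List a) :
    pvPairCount (fun u v => u == v) (ps.map f) = pvPairCount (fun u v => f u == f v) ps := by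
  induction ps with
  | nil => rfl
  | cons x t ih =>
    simp only [List.map_cons, pvPairCount, ih, List.countP_map]
    rfl

theorem pvB_eq (s1 s2 : List Int) :
    disagreement_distance_alt s1 s2
      = pvPairCount (fun u v : Int × Int => u.1 == v.1) (s1.zip s2)
        + pvPairCount (fun u v : Int × Int => u.2 == v.2) (s1.zip s2)
        - 2 * pvPairCount (fun u v : Int × Int => u == v) (s1.zip s2) := by
  unfold disagreement_distance_alt
  rw [PySem.List.foldl_prod_mk
        (f := fun (d : PySem.Dict Int Int) (x : Int × Int) => d.insert x.1 (d.getD x.1 0 + 1))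
        (g := fun (s : PySem.Dict Int Int × PySem.Dict (Int × Int) Int) (x : Int × Int) =>
          (s.1.insert x.2 (s.1.getD x.2 0 + 1), s.2.insert x (s.2.getD x 0 + 1))),
      PySem.List.foldl_prod_mk
        (f := fun (d : PySem.Dict Int Int) (x : Int × Int) => d.insert x.2 (d.getD x.2 0 + 1))
        (g := fun (d : PySem.Dict (Int × Int) Int) (x : Int × Int) => d.insert x (d.getD x 0 + 1))]
  have hfst : (s1.zip s2).foldl
      (fun (d : PySem.Dict Int Int) (x : Int × Int) => d.insert x.1 (d.getD x.1 0 + 1))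
      PySem.Dict.empty = PySem.Dict.counter ((s1.zip s2).map (·.1)) := by
    rw [← PySem.Dict.foldl_insert_getD_add_one_eq_counter, List.foldl_map]
  have hsnd : (s1.zip s2).foldl
      (fun (d : PySem.Dict Int Int) (x : Int × Int) => d.insert x.2 (d.getD x.2 0 + 1))
      PySem.Dict.empty = PySem.Dict.counter ((s1.zip s2).map (·.2)) := by
    rw [← PySem.Dict.foldl_insert_getD_add_one_eq_counter, List.foldl_map]
  have hpair : (s1.zip s2).foldl
      (fun (d : PySem.Dict (Int × Int) Int) (x : Int × Int) => d.insert x (d.getD x 0 + 1))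
      PySem.Dict.empty = PySem.Dict.counter (s1.zip s2) :=
    PySem.Dict.foldl_insert_getD_add_one_eq_counter _
  simp only [hfst, hsnd, hpair, pvPairs_counter, pvPairCount_map]

-- ===== VERDICT (by name: the statement is the Claim_ definition above) =====
theorem disagreement_distance_spec : Claim_equal_disagreement_distance := by
  intro s1 s2 _
  unfold Spec_disagreement_distance
  rw [pvA_eq_G, pvG_eq_pairCount, pvDecomp, pvB_eq]
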